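-- pv_equiv track=rewrite | github.com/hariharan077/sebi-orders-rag | app/sebi_orders_rag/qa/chunk_audit.py | _ordered_count_mapping
-- ===== SOURCE A (Python) =====
-- from collections.abc import Mapping, Sequence
--
-- def _ordered_count_mapping(
--     counts: Mapping[str, int],
--     order: Sequence[str],
-- ) -> Mapping[str, int]:
--     ordered_keys = [flag for flag in order if counts.get(flag, 0) > 0]
--     ordered_keys.extend(
--         sorted(flag for flag, count in counts.items() if count > 0 and flag not in order)
--     )
--     return {flag: int(counts[flag]) for flag in ordered_keys}
-- ===== SOURCE B (Python) =====
-- def _ordered_count_mapping(counts, order):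
--     n = len(order)
--     index = {flag: pos for pos, flag in reversed(list(enumerate(order)))}
--     items = sorted(
--         ((flag, int(count)) for flag, count in counts.items() if count > 0),
--         key=lambda item: (index.get(item[0], n), item[0]),
--     )
--     return dict(items)
-- ===== Notes on version B (the rewrite author's own statement) =====
-- stated objective: faster
-- what changed: A builds the key order in two phases (scan `order` filtering positive counts, then extend with a sorted list of the remaining positive flags, each tested with a linear `flag not in order` scan) and finally rebuilds values by indexing `counts`; B builds a first-position index dict over reversed(enumerate(order)) and produces the result in one stable sort of the positive (flag, count) pairs under the composite key (first index in order, defaulting to len(order), then flag name), returning dict(items) directly.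
import Mathlib
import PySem

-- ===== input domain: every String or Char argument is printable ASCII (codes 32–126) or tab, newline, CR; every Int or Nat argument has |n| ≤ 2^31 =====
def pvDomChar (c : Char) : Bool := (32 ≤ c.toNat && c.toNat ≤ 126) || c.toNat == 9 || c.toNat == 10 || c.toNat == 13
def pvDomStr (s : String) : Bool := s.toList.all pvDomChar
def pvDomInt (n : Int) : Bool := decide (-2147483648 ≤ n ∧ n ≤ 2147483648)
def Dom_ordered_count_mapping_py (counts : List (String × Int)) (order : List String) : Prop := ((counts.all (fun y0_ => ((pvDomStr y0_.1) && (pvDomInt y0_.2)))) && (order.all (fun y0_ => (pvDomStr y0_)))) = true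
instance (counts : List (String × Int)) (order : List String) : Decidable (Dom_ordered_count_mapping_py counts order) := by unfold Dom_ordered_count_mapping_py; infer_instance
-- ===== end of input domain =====

-- B replaces A's two-phase key construction (scan `order` for positive counts, then extend with a
-- sorted list of the remaining positive flags, each tested by a linear `flag not in order` scan, then
-- rebuild values by indexing `counts`) by a first-position index dict over reversed(enumerate(order))
-- and ONE stable sort of the positive (flag, count) pairs under the composite key
-- (first index in `order`, else len(order); then flag), returning dict(items) directly.

-- ===== PORT A =====
def ordered_count_mapping_py (counts : List (String × Int)) (order : List String) : List (String × Int) :=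
  let d := PySem.Dict.ofList counts
  let orderedKeys := order.filter (fun flag => decide (0 < d.getD flag 0))
  let extraKeys := PySem.List.sorted
      ((d.items.filter (fun p => decide (0 < p.2) && !(order.contains p.1))).map (fun p => p.1))
      (fun flag => flag) false
  let keys := orderedKeys ++ extraKeys
  (keys.foldl (fun r flag => r.insert flag (d.getD flag 0)) PySem.Dict.empty).items

-- ===== PORT B =====
def ordered_count_mapping_py_alt (counts : List (String × Int)) (order : List String) : List (String × Int) :=
  let n : Int := order.length
  let index : PySem.Dict String Int :=
    ((PySem.List.enumerate order).reverse).foldl (fun ix p => ix.insert p.2 p.1) PySem.Dict.empty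
  let items := PySem.List.sorted2
      ((PySem.Dict.ofList counts).items.filter (fun p => decide (0 < p.2)))
      (fun item => index.getD item.1 n) (fun item => item.1) false
  (PySem.Dict.ofList items).items

-- ===== PRECONDITION & SPEC =====
def Spec_ordered_count_mapping_py (counts : List (String × Int)) (order : List String) (out : List (String × Int)) : Prop := out = ordered_count_mapping_py_alt counts order
instance (counts : List (String × Int)) (order : List String) (out : List (String × Int)) : Decidable (Spec_ordered_count_mapping_py counts order out) := by unfold Spec_ordered_count_mapping_py; infer_instance

-- ===== CLAIM (what is proved, stated in full; the proofs are below) =====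
def Claim_equal_ordered_count_mapping_py : Prop := ∀ (counts : List (String × Int)) (order : List String), Dom_ordered_count_mapping_py counts order → Spec_ordered_count_mapping_py counts order (ordered_count_mapping_py counts order)

-- ===== LEMMAS AND PROOFS =====

-- lookup in A's result-dict building fold
theorem pvBuildGetD (L : List String) (v : String → Int) (k : String) (d0 : Int)
    (r : PySem.Dict String Int) :
    (L.foldl (fun r f => r.insert f (v f)) r).getD k d0
      = if k ∈ L then v k else r.getD k d0 := by
  induction L generalizing r with
  | nil => simp
  | cons a L ih =>
    simp only [List.foldl_cons, ih, PySem.Dict.getD_insert, List.mem_cons]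
    by_cases h1 : k ∈ L <;> by_cases h2 : k = a <;> simp [h1, h2]

-- adding a disjoint run of fresh distinct elements to a set appends them
theorem pvUpdateDisjoint (B : List String) (s : PySem.Set String) (hB : B.Nodup)
    (hd : ∀ x ∈ B, x ∉ s) : PySem.Set.update s B = s ++ B := by
  induction B generalizing s with
  | nil => simp [PySem.Set.update]
  | cons b B ih =>
    simp only [PySem.Set.update, List.foldl_cons] at *
    have hb : PySem.Set.add s b = s ++ [b] := by
      have : ¬ (b ∈ s) := hd b (by simp)
      simp [PySem.Set.add, PySem.Set.contains, this]
    rw [hb]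
    have := ih (s ++ [b]) hB.of_cons ?_
    · simpa using this
    · intro x hx
      simp only [List.mem_append, List.mem_singleton]
      rintro (h | rfl)
      · exact hd x (by simp [hx]) h
      · exact (List.nodup_cons.mp hB).1 hx

theorem pvDedupAppend (A B : List String) (hB : B.Nodup) (hd : ∀ x ∈ B, x ∉ A) :
    PySem.List.dedup (A ++ B) = PySem.List.dedup A ++ B := by
  have h := pvUpdateDisjoint B (PySem.Set.ofList A) hB ?_
  · simp only [PySem.Set.update] at h
    simp [PySem.List.dedup_eq_ofList, PySem.Set.ofList_eq_foldl, List.foldl_append] at *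
    rw [h]
  · intro x hx
    rw [PySem.Set.mem_ofList]
    exact hd x hx

-- running the set-building fold from any start keeps the start as a prefix
theorem pvFoldlAdd (xs : List String) : ∀ (s : PySem.Set String),
    List.foldl PySem.Set.add s xs
      = s ++ (PySem.Set.ofList xs).filter (fun y => !(s.contains y)) := by
  induction xs with
  | nil => intro s; simp [PySem.Set.ofList_eq_foldl]
  | cons x xs ih =>
    intro s
    simp only [List.foldl_cons]
    rw [ih (PySem.Set.add s x)]
    have hx : PySem.Set.ofList (x :: xs) = PySem.Set.add [] x ++ (PySem.Set.ofList xs).filter (fun y => !((PySem.Set.add [] x).contains y)) := by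
      rw [PySem.Set.ofList_eq_foldl, List.foldl_cons, ih (PySem.Set.add [] x)]
    rw [hx]
    have hadd0 : PySem.Set.add ([] : PySem.Set String) x = [x] := by
      simp [PySem.Set.add, PySem.Set.contains]
    rw [hadd0]
    by_cases hxs : x ∈ s
    · have h1 : PySem.Set.add s x = s := by simp [PySem.Set.add, PySem.Set.contains, hxs]
      rw [h1]
      simp only [List.filter_append, List.filter_filter]
      have : List.filter (fun y => !s.contains y) [x] = [] := by
        simp [hxs]
      rw [this]
      simp only [List.nil_append]
      congr 1
      apply List.filter_congr
      intro y _
      by_cases hyx : y = x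
      · subst hyx; simp [hxs]
      · simp [hyx]
    · have h1 : PySem.Set.add s x = s ++ [x] := by simp [PySem.Set.add, PySem.Set.contains, hxs]
      rw [h1]
      simp only [List.filter_append, List.filter_filter, List.append_assoc]
      congr 1
      have : List.filter (fun y => !s.contains y) [x] = [x] := by
        simp [hxs]
      rw [this]
      congr 1
      apply List.filter_congr
      intro y _
      simp [List.mem_append]

-- ordered dedup, structurally
theorem pvDedupCons (x : String) (xs : List String) :
    PySem.List.dedup (x :: xs) = x :: (PySem.List.dedup xs).filter (fun y => !(x == y)) := by
  simp only [PySem.List.dedup_eq_ofList, PySem.Set.ofList_eq_foldl, List.foldl_cons]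
  have hadd0 : PySem.Set.add ([] : PySem.Set String) x = [x] := by
    simp [PySem.Set.add, PySem.Set.contains]
  rw [hadd0, pvFoldlAdd xs [x]]
  simp only [List.singleton_append, List.cons.injEq, true_and]
  rw [← PySem.Set.ofList_eq_foldl]
  apply List.filter_congr
  intro y _
  by_cases h : y = x
  · subst h; simp
  · simp [h, Ne.symm h]

-- first occurrences commute with a value-level filter
theorem pvDedupFilter (p : String → Bool) (l : List String) :
    PySem.List.dedup (l.filter p) = (PySem.List.dedup l).filter p := by
  induction l with
  | nil => simp
  | cons x xs ih =>
    by_cases hp : p x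
    · rw [List.filter_cons_of_pos hp, pvDedupCons, pvDedupCons,
        List.filter_cons_of_pos hp, ih]
      simp only [List.filter_filter]
      congr 1
      apply List.filter_congr
      intro y _
      rw [Bool.and_comm]
    · rw [List.filter_cons_of_neg hp, pvDedupCons, List.filter_cons_of_neg hp, ih,
        List.filter_filter]
      apply List.filter_congr
      intro y _
      by_cases hyx : x = y
      · subst hyx; simp [hp]
      · simp [hyx]

-- the first-occurrence list is strictly increasing in first-occurrence position
theorem pvPairwiseIdxOf (l : List String) :
    (PySem.List.dedup l).Pairwise (fun a b => List.idxOf a l < List.idxOf b l) := by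
  induction l with
  | nil => simp
  | cons x xs ih =>
    rw [pvDedupCons]
    constructor
    · intro b hb
      have hbx : ¬ (x == b) = true := by
        have := (List.mem_filter.mp hb).2; simpa using this
      rw [List.idxOf_cons, List.idxOf_cons]
      simp only [beq_self_eq_true, cond_true, hbx]
      simp
    · have h1 : (PySem.List.dedup xs).Pairwise (fun a b => List.idxOf a xs < List.idxOf b xs) := ih
      have h2 := h1.filter (fun y => !(x == y))
      refine h2.imp_of_mem ?_
      intro a b ha hb hab
      have hax : ¬ (x == a) = true := by have := (List.mem_filter.mp ha).2; simpa using this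
      have hbx : ¬ (x == b) = true := by have := (List.mem_filter.mp hb).2; simpa using this
      rw [List.idxOf_cons, List.idxOf_cons]
      simp [Bool.eq_false_iff.mpr hax, Bool.eq_false_iff.mpr hbx]
      omega

-- items of A's result-dict building fold: first occurrences, paired with their value
theorem pvBuildItems (L : List String) (v : String → Int) :
    ((L.foldl (fun r f => r.insert f (v f)) PySem.Dict.empty).items)
      = (PySem.List.dedup L).map (fun k => (k, v k)) := by
  have hnd : (L.foldl (fun r f => r.insert f (v f)) (PySem.Dict.empty : PySem.Dict String Int)).keys.Nodup := by
    exact PySem.Dict.nodup_keys_foldl_insert L (fun _ f => v f) PySem.Dict.empty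
      (by simp)
  have hk : (L.foldl (fun r f => r.insert f (v f)) (PySem.Dict.empty : PySem.Dict String Int)).keys
      = PySem.List.dedup L := by
    have := PySem.Dict.keys_foldl_insert L (fun _ f => v f) (PySem.Dict.empty : PySem.Dict String Int)
    rw [this]
    simp only [PySem.Dict.keys_empty, PySem.Set.update, PySem.List.dedup_eq_ofList,
      PySem.Set.ofList_eq_foldl]
  rw [PySem.Dict.items_eq_map_keys _ hnd 0, hk]
  apply List.map_congr_left
  intro k hk'
  have hmem : k ∈ L := (PySem.List.mem_dedup _ _).mp hk'
  rw [pvBuildGetD]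
  simp [hmem]

-- B's reversed-enumerate insert loop looks up each flag's FIRST position in `order`
theorem pvRevIndexGet (order : List String) : ∀ (s : Int) (ix : PySem.Dict String Int) (f : String),
    (((PySem.List.enumerate order s).reverse).foldl (fun d p => d.insert p.2 p.1) ix).get? f
      = if f ∈ order then some (s + (List.idxOf f order : Int)) else ix.get? f := by
  induction order with
  | nil => intro s ix f; simp [PySem.List.enumerate_nil]
  | cons x xs ih =>
    intro s ix f
    rw [PySem.List.enumerate_cons]
    simp only [List.reverse_cons, List.foldl_append, List.foldl_cons, List.foldl_nil]
    by_cases hfx : f = x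
    · subst hfx
      rw [PySem.Dict.get?_insert_self]
      simp
    · rw [PySem.Dict.get?_insert_of_ne _ _ hfx, ih (s + 1) ix f]
      by_cases hm : f ∈ xs
      · simp only [hm, if_true, List.mem_cons, hfx, false_or, if_true]
        congr 1
        rw [List.idxOf_cons]
        have hbx : (x == f) = false := by simp [Ne.symm hfx]
        simp [hbx]
        ring
      · simp [hm, hfx]

-- items of dict(pairs) when the keys are already distinct
theorem pvOfListItems (l : List (String × Int)) (h : (l.map (fun p => p.1)).Nodup) :
    (PySem.Dict.ofList l).items = l := by
  have hfresh : ∀ a ∈ l, (PySem.Dict.empty : PySem.Dict String Int).contains a.1 = false := by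
    intro a _; simp
  have := PySem.Dict.items_foldl_insert_fresh l (fun p => p.1) (fun p => p.2)
    PySem.Dict.empty hfresh h
  simpa [PySem.Dict.ofList, PySem.Dict.update] using this

-- sorting with the pair key (k1, k2) is sorting under the lexicographic key
theorem pvSorted2Lex {α : Type} (xs : List α) (k1 : α → Int) (k2 : α → String) :
    PySem.List.sorted2 xs k1 k2 false
      = PySem.List.sorted xs (fun a => toLex (k1 a, k2 a)) false := by
  have hcmp : (fun (a b : α) => decide (k1 a < k1 b) || (!decide (k1 b < k1 a) && decide (k2 a < k2 b)))
      = (fun (a b : α) => decide (toLex (k1 a, k2 a) < toLex (k1 b, k2 b))) := by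
    funext a b
    by_cases h1 : k1 a < k1 b
    · simp [h1, Prod.Lex.lt_iff]
    · by_cases h2 : k1 b < k1 a
      · have hne : ¬ (k1 a = k1 b) := by omega
        simp [h1, h2, Prod.Lex.lt_iff, hne]
      · have heq : k1 a = k1 b := by omega
        simp [Prod.Lex.lt_iff, heq]
  rw [PySem.List.sorted_eq_foldl_insertBy]
  show List.foldl (fun acc x => PySem.List.insertBy (fun a b => decide (k1 a < k1 b) || (!decide (k1 b < k1 a) && decide (k2 a < k2 b))) x acc) [] xs = _
  rw [hcmp]

-- the heart of the equivalence: A's deduplicated two-phase key list, paired with its values,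
-- IS B's single sorted pair list
theorem pvMainEq (counts : List (String × Int)) (order : List String) :
    ordered_count_mapping_py counts order = ordered_count_mapping_py_alt counts order := by
  set d := PySem.Dict.ofList counts with hd
  have hnd : d.keys.Nodup := PySem.Dict.nodup_keys_ofList counts
  set n : Int := (order.length : Int) with hn
  set index := ((PySem.List.enumerate order).reverse).foldl (fun ix p => ix.insert p.2 p.1)
      (PySem.Dict.empty : PySem.Dict String Int) with hindex
  set k1 : String → Int := fun f => index.getD f n with hk1
  set P : String → Bool := fun f => decide (0 < d.getD f 0) with hP
  set orderedKeys := order.filter P with hok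
  set base := (d.items.filter (fun p => decide (0 < p.2) && !(order.contains p.1))).map (fun p => p.1) with hbase
  set extra := PySem.List.sorted base (fun f => f) false with hextra
  set posPairs := d.items.filter (fun p => decide (0 < p.2)) with hpp
  set pos := posPairs.map (fun p => p.1) with hpos
  have hk1mem : ∀ f ∈ order, k1 f = (List.idxOf f order : Int) := by
    intro f hf
    rw [hk1]
    simp only [PySem.Dict.getD_eq_get?_getD, hindex, pvRevIndexGet order 0 _ f, hf, if_true]
    simp
  have hk1not : ∀ f, f ∉ order → k1 f = n := by
    intro f hf
    rw [hk1]
    simp only [PySem.Dict.getD_eq_get?_getD, hindex, pvRevIndexGet order 0 _ f, hf, if_false]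
    simp
  have hposmem : ∀ f, f ∈ pos ↔ 0 < d.getD f 0 := by
    intro f
    constructor
    · intro hm
      rw [hpos] at hm
      obtain ⟨p, hp, rfl⟩ := List.mem_map.mp hm
      have h2 := List.mem_filter.mp hp
      have := PySem.Dict.getD_of_mem_items d (k := p.1) (v := p.2) (by simpa using h2.1) hnd 0
      rw [this]
      simpa using h2.2
    · intro hpos0
      have hg : d.get? f = some (d.getD f 0) := by
        cases hg : d.get? f with
        | none => rw [PySem.Dict.getD_eq_get?_getD, hg] at hpos0; simp at hpos0
        | some v => rw [PySem.Dict.getD_eq_get?_getD, hg]; rfl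
      have hmem := PySem.Dict.mem_items_of_get?_eq_some d hg
      rw [hpos, hpp]
      exact List.mem_map.mpr ⟨(f, d.getD f 0), List.mem_filter.mpr ⟨hmem, by simpa using hpos0⟩, rfl⟩
  have hbasemem : ∀ f, f ∈ base ↔ (0 < d.getD f 0 ∧ f ∉ order) := by
    intro f
    constructor
    · intro hm
      rw [hbase] at hm
      obtain ⟨p, hp, rfl⟩ := List.mem_map.mp hm
      have h2 := List.mem_filter.mp hp
      have hq := h2.2
      simp only [Bool.and_eq_true, decide_eq_true_eq, Bool.not_eq_true'] at hq
      have := PySem.Dict.getD_of_mem_items d (k := p.1) (v := p.2) (by simpa using h2.1) hnd 0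
      rw [this]
      refine ⟨hq.1, ?_⟩
      intro hmem
      rw [← List.contains_iff_mem] at hmem
      rw [hq.2] at hmem
      simp at hmem
    · rintro ⟨hpos0, hno⟩
      have hg : d.get? f = some (d.getD f 0) := by
        cases hg : d.get? f with
        | none => rw [PySem.Dict.getD_eq_get?_getD, hg] at hpos0; simp at hpos0
        | some v => rw [PySem.Dict.getD_eq_get?_getD, hg]; rfl
      have hmem := PySem.Dict.mem_items_of_get?_eq_some d hg
      rw [hbase]
      refine List.mem_map.mpr ⟨(f, d.getD f 0), List.mem_filter.mpr ⟨hmem, ?_⟩, rfl⟩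
      simp only [Bool.and_eq_true, decide_eq_true_eq, Bool.not_eq_true']
      refine ⟨hpos0, ?_⟩
      rw [← Bool.not_eq_true, List.contains_iff_mem]
      exact hno
  have hextramem : ∀ f, f ∈ extra ↔ f ∈ base := fun f =>
    (PySem.List.sorted_perm base (fun f => f) false).mem_iff
  have hordmem : ∀ f, f ∈ orderedKeys ↔ f ∈ order ∧ 0 < d.getD f 0 := by
    intro f
    rw [hok, List.mem_filter, hP]
    simp
  have hkeys : d.items.map (fun p => p.1) = d.keys := by
    simp [PySem.Dict.keys]
  have hndpos : pos.Nodup := by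
    rw [hpos, hpp]
    refine List.Nodup.sublist ?_ (hkeys ▸ hnd)
    exact List.Sublist.map _ List.filter_sublist
  have hndbase : base.Nodup := by
    rw [hbase]
    refine List.Nodup.sublist ?_ (hkeys ▸ hnd)
    exact List.Sublist.map _ List.filter_sublist
  have hndextra : extra.Nodup :=
    ((PySem.List.sorted_perm base (fun f => f) false).nodup_iff).mpr hndbase
  set key : String → Lex (Int × String) := fun f => toLex (k1 f, f) with hkey
  set L := PySem.List.dedup orderedKeys ++ extra with hL
  have hsplit : PySem.List.dedup (orderedKeys ++ extra) = L := by
    refine pvDedupAppend _ _ hndextra ?_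
    intro x hx
    have hb := (hbasemem x).mp ((hextramem x).mp hx)
    intro hc
    exact hb.2 ((hordmem x).mp hc).1
  have hLnodup : L.Nodup := by
    rw [hL, List.nodup_append]
    refine ⟨PySem.List.nodup_dedup _, hndextra, ?_⟩
    intro a ha b hb
    rintro rfl
    have h1 := (hordmem a).mp ((PySem.List.mem_dedup _ _).mp ha)
    have h2 := (hbasemem a).mp ((hextramem a).mp hb)
    exact h2.2 h1.1
  have hperm : L.Perm pos := by
    rw [List.perm_ext_iff_of_nodup hLnodup hndpos]
    intro a
    rw [hL, List.mem_append, PySem.List.mem_dedup, hordmem, hextramem, hbasemem, hposmem]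
    by_cases ha : a ∈ order <;> simp [ha]
  have hpair : L.Pairwise (fun a b => key a < key b) := by
    rw [hL, List.pairwise_append]
    refine ⟨?_, ?_, ?_⟩
    · rw [hok, pvDedupFilter]
      refine ((pvPairwiseIdxOf order).filter P).imp_of_mem ?_
      intro a b ha hb hab
      have ha' := (PySem.List.mem_dedup _ _).mp (List.mem_of_mem_filter ha)
      have hb' := (PySem.List.mem_dedup _ _).mp (List.mem_of_mem_filter hb)
      rw [hkey, Prod.Lex.lt_iff]
      left
      simp only [ofLex_toLex]
      rw [hk1mem a ha', hk1mem b hb']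
      exact_mod_cast hab
    · have hle := PySem.List.sorted_pairwise base (fun f => f)
      rw [← hextra] at hle
      have hne : extra.Pairwise (fun a b => a ≠ b) := hndextra
      refine (hle.and hne).imp_of_mem ?_
      intro a b ha hb hab
      have ha' := (hbasemem a).mp ((hextramem a).mp ha)
      have hb' := (hbasemem b).mp ((hextramem b).mp hb)
      rw [hkey, Prod.Lex.lt_iff]
      right
      simp only [ofLex_toLex]
      rw [hk1not a ha'.2, hk1not b hb'.2]
      exact ⟨rfl, lt_of_le_of_ne hab.1 hab.2⟩
    · intro a ha b hb
      have h1 := (hordmem a).mp ((PySem.List.mem_dedup _ _).mp ha)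
      have h2 := (hbasemem b).mp ((hextramem b).mp hb)
      rw [hkey, Prod.Lex.lt_iff]
      left
      simp only [ofLex_toLex]
      rw [hk1mem a h1.1, hk1not b h2.2, hn]
      exact_mod_cast List.idxOf_lt_length_of_mem h1.1
  -- the positive pair list is the positive flag list paired with its values
  have hppval : pos.map (fun k => (k, d.getD k 0)) = posPairs := by
    rw [hpos, List.map_map]
    have hcongr : ∀ p ∈ posPairs, ((fun k => (k, d.getD k 0)) ∘ (fun p => p.1)) p = id p := by
      intro p hp
      have hpi : (p.1, p.2) ∈ d.items := by
        have := (List.mem_filter.mp hp).1; simpa using this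
      have := PySem.Dict.getD_of_mem_items d (k := p.1) (v := p.2) hpi hnd 0
      simp [Function.comp, this]
    rw [List.map_congr_left hcongr, List.map_id]
  -- B's single sort produces exactly A's key list, paired with its values
  have hpairPerm : (L.map (fun k => (k, d.getD k 0))).Perm posPairs := by
    rw [← hppval]
    exact hperm.map _
  have hpairLt : (L.map (fun k => (k, d.getD k 0))).Pairwise
      (fun p q => (fun p : String × Int => toLex (k1 p.1, p.1)) p < (fun p : String × Int => toLex (k1 p.1, p.1)) q) := by
    rw [List.pairwise_map]
    exact hpair
  have hsorted : PySem.List.sorted posPairs (fun p => toLex (k1 p.1, p.1)) false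
      = L.map (fun k => (k, d.getD k 0)) :=
    PySem.List.sorted_eq_of_perm_of_pairwise_lt _ _ _ hpairPerm hpairLt
  have hspEq : PySem.List.sorted2 posPairs (fun p => k1 p.1) (fun p => p.1) false
      = L.map (fun k => (k, d.getD k 0)) := by
    rw [pvSorted2Lex posPairs (fun p => k1 p.1) (fun p => p.1)]
    exact hsorted
  show ordered_count_mapping_py counts order = ordered_count_mapping_py_alt counts order
  simp only [ordered_count_mapping_py, ordered_count_mapping_py_alt]
  rw [pvBuildItems _ (fun f => d.getD f 0)]
  rw [← hd, ← hn, ← hindex, ← hok, ← hbase, ← hextra, ← hpp]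
  simp only [hk1] at hspEq
  rw [hsplit, hspEq]
  rw [pvOfListItems]
  rw [List.map_map]
  have : ((fun p : String × Int => p.1) ∘ fun k => (k, d.getD k 0)) = id := rfl
  rw [this, List.map_id]
  exact hLnodup

-- ===== VERDICT (by name: the statement is the Claim_ definition above) =====
theorem ordered_count_mapping_py_spec : Claim_equal_ordered_count_mapping_py := by
  intro counts order _
  unfold Spec_ordered_count_mapping_py
  exact pvMainEq counts order
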